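-- pv_equiv track=rewrite | github.com/Cyberamirka/LinProgOtrabotka | CoderMethods/CRC.py | mod2_division
-- ===== SOURCE A (Python) =====
-- def mod2_division(dividend: str, divisor: str) -> str:
--     """Деление по модулю 2 (XOR)"""
--     divisor_len = len(divisor)
--     dividend = list(dividend)
--
--     for i in range(len(dividend) - divisor_len + 1):
--         if dividend[i] == '1':
--             for j in range(divisor_len):
--                 dividend[i + j] = '1' if dividend[i + j] != divisor[j] else '0'
--
--     return ''.join(dividend)[-divisor_len + 1:]
-- ===== SOURCE B (Python) =====
-- def mod2_division(dividend: str, divisor: str) -> str: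
--     """Mod-2 (XOR) division via a sliding remainder register: one pass,
--     keeping only a divisor-sized window instead of rewriting the dividend."""
--     dlen = len(divisor)
--     n = len(dividend)
--     out = []
--     window = list(dividend[:dlen])
--     for i in range(n - dlen + 1):
--         if window[0] == '1':
--             window = ['1' if a != b else '0' for a, b in zip(window, divisor)]
--         out.append(window[0])
--         window = window[1:]
--         if dlen + i < n:
--             window.append(dividend[dlen + i])
--     return (''.join(out) + ''.join(window))[-dlen + 1:]
-- ===== Notes on version B (the rewrite author's own statement) =====
-- stated objective: alternative
-- what changed: Replaces in-place rewriting of the whole dividend list (nested index loops with element assignment) by a single-pass sliding remainder register: a divisor-sized window is XORed via zip and shifted, emitting one settled character per step.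
import Mathlib
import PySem

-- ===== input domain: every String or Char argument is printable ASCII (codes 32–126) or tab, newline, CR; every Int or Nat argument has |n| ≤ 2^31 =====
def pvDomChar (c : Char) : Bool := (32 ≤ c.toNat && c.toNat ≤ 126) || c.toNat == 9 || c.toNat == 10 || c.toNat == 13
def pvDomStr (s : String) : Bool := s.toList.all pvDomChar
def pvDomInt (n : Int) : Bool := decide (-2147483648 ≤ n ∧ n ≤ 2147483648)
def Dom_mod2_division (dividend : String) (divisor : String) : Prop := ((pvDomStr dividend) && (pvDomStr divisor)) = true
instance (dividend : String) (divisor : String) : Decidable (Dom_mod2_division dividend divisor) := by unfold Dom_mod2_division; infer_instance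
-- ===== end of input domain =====

-- B replaces A's in-place nested-loop rewriting of the dividend by a one-pass
-- sliding remainder register (alternative decomposition, same cost).

-- ===== PORT A =====
-- inner loop: for j in range(divisor_len): dividend[i+j] = '1' if dividend[i+j] != divisor[j] else '0'
def pvXorInner (dl : List Char) (i : Nat) (lst : List Char) : List Char :=
  (List.range dl.length).foldl
    (fun acc j => acc.set (i + j) (if acc.getD (i + j) ' ' ≠ dl.getD j ' ' then '1' else '0')) lst

def pvAStep (dl : List Char) (acc : List Char) (i : Nat) : List Char :=
  if acc.getD i ' ' = '1' then pvXorInner dl i acc else acc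

-- range(len(dividend) - divisor_len + 1): Nat subtraction gives the same count (empty when negative)
def mod2_division (dividend : String) (divisor : String) : String :=
  String.mk (PySem.List.slice
    ((List.range (dividend.toList.length + 1 - divisor.toList.length)).foldl
      (pvAStep divisor.toList) dividend.toList)
    (some (1 - (divisor.toList.length : Int))) none)

-- ===== PORT B =====
-- state = (out, window); one register step per loop iteration
def pvBStep (dv dl : List Char) (st : List Char × List Char) (i : Nat) : List Char × List Char :=
  let w := if st.2.headD ' ' = '1'
           then List.zipWith (fun a b => if a ≠ b then '1' else '0') st.2 dl
           else st.2
  (st.1 ++ [w.headD ' '],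
   w.tail ++ (if dl.length + i < dv.length then [dv.getD (dl.length + i) ' '] else []))

-- the register loop: out starts empty, window = dividend[:dlen]
def pvBRun (dv dl : List Char) : List Char × List Char :=
  (List.range (dv.length + 1 - dl.length)).foldl (pvBStep dv dl) ([], dv.take dl.length)

def mod2_division_alt (dividend : String) (divisor : String) : String :=
  String.mk (PySem.List.slice
    ((pvBRun dividend.toList divisor.toList).1 ++ (pvBRun dividend.toList divisor.toList).2)
    (some (1 - (divisor.toList.length : Int))) none)

-- ===== PRECONDITION & SPEC =====
-- Pre_ excludes exactly divisor = "", on which A (and B) raise IndexError (dividend[0] / window[0] on an out-of-range index).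
def Pre_mod2_division (dividend : String) (divisor : String) : Prop := divisor ≠ ""
instance (dividend : String) (divisor : String) : Decidable (Pre_mod2_division dividend divisor) := by unfold Pre_mod2_division; infer_instance
def pvWitness_mod2_division : String × String := ("1101011011", "10011")

def Spec_mod2_division (dividend : String) (divisor : String) (out : String) : Prop := out = mod2_division_alt dividend divisor
instance (dividend : String) (divisor : String) (out : String) : Decidable (Spec_mod2_division dividend divisor out) := by unfold Spec_mod2_division; infer_instance

-- ===== CLAIM (what is proved, stated in full; the proofs are below) =====
def Claim_equal_mod2_division : Prop := ∀ (dividend : String) (divisor : String), Dom_mod2_division dividend divisor → Pre_mod2_division dividend divisor → Spec_mod2_division dividend divisor (mod2_division dividend divisor)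

-- ===== LEMMAS AND PROOFS =====

lemma pv_getD_at_len (out rest : List Char) : (out ++ rest).getD out.length ' ' = rest.headD ' ' := by
  induction out with
  | nil => cases rest <;> simp [List.getD]
  | cons a t ih => simpa using ih

lemma pv_set_at_len (out rest : List Char) (c : Char) :
    (out ++ rest).set out.length c = out ++ rest.set 0 c := by
  induction out with
  | nil => rfl
  | cons a t ih => simpa using ih

-- the inner j-loop on out ++ w ++ suf (|out| = i, |w| = |dl|) XORs the window in place
lemma pv_inner_go (dl : List Char) : ∀ (w out suf : List Char) (i : Nat),
    out.length = i → w.length = dl.length →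
    (List.range dl.length).foldl
      (fun acc j => acc.set (i + j) (if acc.getD (i + j) ' ' ≠ dl.getD j ' ' then '1' else '0'))
      (out ++ w ++ suf)
    = out ++ List.zipWith (fun a b => if a ≠ b then '1' else '0') w dl ++ suf := by
  induction dl with
  | nil =>
    intro w out suf i hi hw
    simp at hw
    simp [hw]
  | cons b dl ih =>
    intro w out suf i hi hw
    cases w with
    | nil => simp at hw
    | cons a w =>
      simp only [List.length_cons, List.range_succ_eq_map, List.foldl_cons, List.foldl_map,
        List.getD_cons_zero]
      have h1 : ((out ++ a :: w ++ suf).getD (i + 0) ' ') = a := by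
        subst hi
        simpa using pv_getD_at_len out ((a :: w) ++ suf)
      rw [h1]
      have h2 : (out ++ a :: w ++ suf).set (i + 0) (if a ≠ b then '1' else '0')
          = (out ++ [if a ≠ b then '1' else '0']) ++ w ++ suf := by
        subst hi
        have := pv_set_at_len out (a :: (w ++ suf)) (if a ≠ b then '1' else '0')
        simp only [List.append_assoc, List.cons_append, Nat.add_zero] at this ⊢
        simpa using this
      rw [h2]
      have hw' : w.length = dl.length := by simpa using hw
      have hfun : (fun (x : List Char) (y : Nat) =>
            x.set (i + y.succ) (if x.getD (i + y.succ) ' ' ≠ (b :: dl).getD y.succ ' ' then '1' else '0'))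
          = (fun (x : List Char) (y : Nat) =>
            x.set ((i + 1) + y) (if x.getD ((i + 1) + y) ' ' ≠ dl.getD y ' ' then '1' else '0')) := by
        funext x y
        rw [show i + y.succ = (i + 1) + y from by omega, List.getD_cons_succ]
      rw [hfun, ih w (out ++ [if a ≠ b then '1' else '0']) suf (i + 1) (by simp [hi]) hw',
        List.zipWith_cons_cons]
      simp

-- one A-step on the decomposed state equals one B-step
lemma pv_drop_cons (dv : List Char) (p : Nat) (h : p < dv.length) :
    dv.drop p = dv.getD p ' ' :: dv.drop (p + 1) := by
  rw [List.getD_eq_getElem dv ' ' h]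
  exact List.drop_eq_getElem_cons h

-- main loop invariant: A's list state is out ++ window ++ untouched suffix
lemma pv_loop_agree (dv dl : List Char) (hdl : dl ≠ []) :
    ∀ (m k : Nat) (out win : List Char),
    out.length = k → win.length = dl.length →
    k + m = dv.length + 1 - dl.length →
    dl.length + k ≤ dv.length + 1 →
    (List.range' k m).foldl (pvAStep dl) (out ++ win ++ dv.drop (dl.length + k))
      = ((List.range' k m).foldl (pvBStep dv dl) (out, win)).1
        ++ ((List.range' k m).foldl (pvBStep dv dl) (out, win)).2
        ++ dv.drop (dl.length + k + m) := by
  intro m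
  induction m with
  | zero => intro k out win _ _ _ _; simp
  | succ m ih =>
    intro k out win hout hwin hsteps hle
    have hwnil : win ≠ [] := by
      intro h; subst h; simp at hwin
      exact hdl (List.eq_nil_of_length_eq_zero hwin.symm)
    obtain ⟨a, w, rfl⟩ := List.exists_cons_of_ne_nil hwnil
    have hkn : dl.length + k ≤ dv.length := by omega
    simp only [List.range'_succ, List.foldl_cons]
    -- A's step
    have hget : (out ++ (a :: w) ++ dv.drop (dl.length + k)).getD k ' ' = a := by
      subst hout; simpa using pv_getD_at_len out ((a :: w) ++ dv.drop (dl.length + k))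
    have hA : pvAStep dl (out ++ (a :: w) ++ dv.drop (dl.length + k)) k
        = out ++ (if a = '1'
                  then List.zipWith (fun x y => if x ≠ y then '1' else '0') (a :: w) dl
                  else (a :: w)) ++ dv.drop (dl.length + k) := by
      unfold pvAStep
      rw [hget]
      by_cases ha : a = '1'
      · simp only [if_pos ha]
        unfold pvXorInner
        rw [pv_inner_go dl (a :: w) out (dv.drop (dl.length + k)) k hout hwin]
      · simp only [if_neg ha]
    rw [hA]
    set w' := (if a = '1'
               then List.zipWith (fun x y => if x ≠ y then '1' else '0') (a :: w) dl
               else (a :: w)) with hw'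
    -- B's step
    have hB : pvBStep dv dl (out, a :: w) k
        = (out ++ [w'.headD ' '],
           w'.tail ++ (if dl.length + k < dv.length then [dv.getD (dl.length + k) ' '] else [])) := by
      unfold pvBStep
      simp only [hw']
      by_cases ha : a = '1' <;> simp [ha]
    rw [hB]
    have hw'len : w'.length = dl.length := by
      rw [hw']
      have hlen : w.length + 1 = dl.length := by simpa using hwin
      by_cases ha : a = '1'
      · simp [ha]
        omega
      · simp [ha, hlen]
    have hw'nil : w' ≠ [] := by
      intro h; rw [h] at hw'len; exact hdl (List.eq_nil_of_length_eq_zero hw'len.symm)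
    obtain ⟨h0, wt, hw'eq⟩ := List.exists_cons_of_ne_nil hw'nil
    by_cases hfeed : dl.length + k < dv.length
    · -- a character is pulled in: window stays full
      have hsuf : dv.drop (dl.length + k)
          = dv.getD (dl.length + k) ' ' :: dv.drop (dl.length + k + 1) := pv_drop_cons dv _ hfeed
      have hre : out ++ w' ++ dv.drop (dl.length + k)
          = (out ++ [w'.headD ' ']) ++ (w'.tail ++ [dv.getD (dl.length + k) ' '])
            ++ dv.drop (dl.length + (k + 1)) := by
        rw [hw'eq, hsuf]
        simp only [List.headD_cons, List.tail_cons]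
        have : dl.length + (k + 1) = dl.length + k + 1 := by omega
        rw [this]; simp
      rw [hre, if_pos hfeed]
      have := ih (k + 1) (out ++ [w'.headD ' '])
        (w'.tail ++ [dv.getD (dl.length + k) ' '])
        (by simp [hout]) (by rw [hw'eq]; simp; rw [hw'eq] at hw'len; simp at hw'len; omega)
        (by omega) (by omega)
      rw [this, show dl.length + (k + 1) + m = dl.length + k + (m + 1) from by omega]
    · -- last step of the dividend: nothing pulled in, and m = 0 is forced
      have hm0 : m = 0 := by omega
      subst hm0
      have hdrop : dv.drop (dl.length + k) = [] := by
        apply List.drop_eq_nil_of_le; omega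
      rw [if_neg hfeed]
      simp only [List.range'_zero, List.foldl_nil]
      have hdrop' : dv.drop (dl.length + k + 1) = [] := by
        apply List.drop_eq_nil_of_le; omega
      rw [hdrop, hdrop', hw'eq]
      simp

lemma pv_full_eq (dv dl : List Char) (hdl : dl ≠ []) :
    (List.range (dv.length + 1 - dl.length)).foldl (pvAStep dl) dv
      = ((List.range (dv.length + 1 - dl.length)).foldl (pvBStep dv dl) ([], dv.take dl.length)).1
        ++ ((List.range (dv.length + 1 - dl.length)).foldl (pvBStep dv dl) ([], dv.take dl.length)).2 := by
  by_cases h : dl.length ≤ dv.length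
  · have htake : (dv.take dl.length).length = dl.length := by simp [h]
    have key := pv_loop_agree dv dl hdl (dv.length + 1 - dl.length) 0 [] (dv.take dl.length)
      rfl htake (by omega) (by omega)
    simp only [List.nil_append, Nat.add_zero] at key
    rw [List.take_append_drop] at key
    rw [List.drop_eq_nil_of_le (by omega : dv.length ≤ dl.length + (dv.length + 1 - dl.length)),
      List.append_nil] at key
    rw [List.range_eq_range']
    exact key
  · have h0 : dv.length + 1 - dl.length = 0 := by omega
    have htake : dv.take dl.length = dv := List.take_of_length_le (by omega)
    rw [h0]
    simp [htake]

-- ===== VERDICT (by name: the statement is the Claim_ definition above) =====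
theorem mod2_division_spec : Claim_equal_mod2_division := by
  intro dividend divisor _ hpre
  unfold Spec_mod2_division mod2_division mod2_division_alt pvBRun
  have hdl : divisor.toList ≠ [] := by
    intro h
    apply hpre
    have := congrArg String.ofList h
    simpa using this
  rw [pv_full_eq dividend.toList divisor.toList hdl]
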